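-- pv_equiv track=rewrite | github.com/aristofanee/manipolazioneDati | src/functions.py | removeSpaceCaps
-- ===== SOURCE A (Python) =====
-- def removeSpaceCaps(genericString: str) -> str:
--     outputString: list[str] = []
--     spacePresent = False
--
--     for index, char in enumerate(genericString):
--         if char == ' ':
--             spacePresent = True
--         else:
--             if spacePresent and char.isalpha():
--                 outputString.append(char.upper())
--                 spacePresent = False
--             else:
--                 outputString.append(char)
--
--     return ''.join(outputString)
-- ===== SOURCE B (Python) =====
-- def _cap_first_alpha(p: str) -> str:
--     for i, ch in enumerate(p):
--         if ch.isalpha():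
--             return p[:i] + ch.upper() + p[i+1:]
--     return p
--
--
-- def removeSpaceCaps(genericString: str) -> str:
--     pieces = genericString.split(' ')
--     return pieces[0] + ''.join(map(_cap_first_alpha, pieces[1:]))
-- ===== Notes on version B (the rewrite author's own statement) =====
-- stated objective: simpler
-- what changed: Replaced the char-by-char loop with a spacePresent flag by splitting on the space character and uppercasing the first alphabetic character of each piece after the first, then concatenating.
import Mathlib
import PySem

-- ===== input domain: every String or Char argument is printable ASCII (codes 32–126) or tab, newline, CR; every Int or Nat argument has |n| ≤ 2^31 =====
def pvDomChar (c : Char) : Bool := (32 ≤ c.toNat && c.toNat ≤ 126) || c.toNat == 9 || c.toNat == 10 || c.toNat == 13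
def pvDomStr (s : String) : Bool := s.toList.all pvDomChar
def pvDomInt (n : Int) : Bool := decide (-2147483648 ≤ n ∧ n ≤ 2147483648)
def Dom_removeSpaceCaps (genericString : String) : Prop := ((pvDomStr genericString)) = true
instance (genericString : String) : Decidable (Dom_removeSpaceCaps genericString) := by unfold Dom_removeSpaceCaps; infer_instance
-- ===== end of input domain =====

-- B replaces A's char-by-char flag loop by split-on-space + uppercase-first-alpha per piece (simpler; a timing run measured it faster by a constant factor).

-- ===== PORT A =====
-- one loop step: state is (outputString as chars, spacePresent); '' .join of 1-char strings = String.ofList of the chars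
def removeSpaceCapsStep (st : List Char × Bool) (p : Int × Char) : List Char × Bool :=
  if p.2 = ' ' then (st.1, true)
  else if st.2 && PySem.Chars.isalpha p.2 then (st.1 ++ [PySem.Chars.upperChar p.2], false)
  else (st.1 ++ [p.2], st.2)

def removeSpaceCaps (genericString : String) : String :=
  String.ofList ((PySem.List.enumerate genericString.toList 0).foldl removeSpaceCapsStep ([], false)).1

-- ===== PORT B =====
-- _cap_first_alpha: scan for the first alpha char, uppercase it, keep the rest
def capFirstAlpha : List Char → List Char
  | [] => []
  | c :: cs =>
    if PySem.Chars.isalpha c then PySem.Chars.upperChar c :: cs else c :: capFirstAlpha cs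

def removeSpaceCaps_alt (genericString : String) : String :=
  let pieces := genericString.toList.splitOn ' '
  String.ofList (pieces.headD [] ++ PySem.Chars.join [] ((pieces.drop 1).map capFirstAlpha))

-- ===== PRECONDITION & SPEC =====
def Spec_removeSpaceCaps (genericString : String) (out : String) : Prop := out = removeSpaceCaps_alt genericString
instance (genericString : String) (out : String) : Decidable (Spec_removeSpaceCaps genericString out) := by unfold Spec_removeSpaceCaps; infer_instance

-- ===== CLAIM (what is proved, stated in full; the proofs are below) =====
def Claim_equal_removeSpaceCaps : Prop := ∀ (genericString : String), Dom_removeSpaceCaps genericString → Spec_removeSpaceCaps genericString (removeSpaceCaps genericString)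

-- ===== LEMMAS AND PROOFS =====

-- A's loop without the accumulator: the characters it emits from cs given the current flag
def aLoop : List Char → Bool → List Char
  | [], _ => []
  | c :: cs, sp =>
    if c = ' ' then aLoop cs true
    else if sp && PySem.Chars.isalpha c then PySem.Chars.upperChar c :: aLoop cs false
    else c :: aLoop cs sp

theorem foldl_step_eq_aLoop (l : List (Int × Char)) (out : List Char) (sp : Bool) :
    (l.foldl removeSpaceCapsStep (out, sp)).1 = out ++ aLoop (l.map (·.2)) sp := by
  induction l generalizing out sp with
  | nil => simp [aLoop]
  | cons p l ih =>
    simp only [List.foldl_cons, removeSpaceCapsStep, List.map_cons, aLoop]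
    by_cases hc : p.2 = ' '
    · simp [hc, ih]
    · by_cases ha : sp && PySem.Chars.isalpha p.2
      · simp [hc, ha, ih]
      · simp [hc, ha, ih]

-- the heart: A's flag loop against B's split-on-space view, both flag states at once
theorem aLoop_splitOn (cs : List Char) :
    aLoop cs false
        = (cs.splitOn ' ').headD [] ++ (((cs.splitOn ' ').drop 1).map capFirstAlpha).flatten
      ∧ aLoop cs true = ((cs.splitOn ' ').map capFirstAlpha).flatten := by
  induction cs with
  | nil => simp [aLoop, List.splitOn, List.splitOnP_nil, capFirstAlpha]
  | cons c cs ih =>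
    obtain ⟨ih1, ih2⟩ := ih
    simp only [List.splitOn] at ih1 ih2 ⊢
    by_cases hc : c = ' '
    · subst hc
      rw [List.splitOnP_cons]
      simp only [beq_self_eq_true]
      constructor
      · simpa [aLoop] using ih2
      · simpa [aLoop, capFirstAlpha] using ih2
    · obtain ⟨p, ps, hps⟩ :=
        List.exists_cons_of_ne_nil (List.splitOnP_ne_nil (fun x => x == ' ') cs)
      rw [List.splitOnP_cons]
      have hb : ((c == ' ') = true) = False := by simp [hc]
      rw [hps] at ih1 ih2 ⊢
      simp only [hb, if_false, List.modifyHead_cons]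
      constructor
      · simp only [aLoop, if_neg hc, Bool.false_and, Bool.false_eq_true, if_false]
        rw [ih1]
        simp
      · simp only [aLoop, if_neg hc, Bool.true_and]
        by_cases ha : PySem.Chars.isalpha c
        · rw [if_pos ha, ih1]
          simp [capFirstAlpha, ha]
        · rw [if_neg ha, ih2]
          simp [capFirstAlpha, ha]

-- ===== VERDICT (by name: the statement is the Claim_ definition above) =====
theorem removeSpaceCaps_spec : Claim_equal_removeSpaceCaps := by
  intro s _
  unfold Spec_removeSpaceCaps removeSpaceCaps removeSpaceCaps_alt
  rw [foldl_step_eq_aLoop, PySem.List.map_snd_enumerate]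
  have h := (aLoop_splitOn s.toList).1
  simp only [List.nil_append, h, PySem.Chars.join]
  simp only [List.intercalate]
  congr 1
  generalize (List.map capFirstAlpha (List.drop 1 (List.splitOn ' ' s.toList))) = l
  induction l with
  | nil => rfl
  | cons a l ih =>
    cases l with
    | nil => rfl
    | cons b l => simp_all [List.intersperse]
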